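-- pv_equiv track=rewrite | github.com/Genomics-HSE/VGsim | IO.py | allChildrens
-- ===== SOURCE A (Python) =====
-- def allChildrens(nodes, sequence):
--     result = dict()
--     for node in nodes:
--         result[node] = []
--     for index in range(len(sequence)):
--         if sequence[index] in nodes:
--             result[sequence[index]].append(index)
--     return result
-- ===== SOURCE B (Python) =====
-- def allChildrens(nodes, sequence):
--     return {node: [i for i in range(len(sequence)) if sequence[i] == node]
--             for node in nodes}
-- ===== Notes on version B (the rewrite author's own statement) =====
-- stated objective: simpler
-- what changed: Replaces A's dict-initialisation pass plus single indexed pass with a membership-dispatch branch by a one-line dict comprehension that builds each key's bucket with its own filtering scan over the sequence.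
import Mathlib
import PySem

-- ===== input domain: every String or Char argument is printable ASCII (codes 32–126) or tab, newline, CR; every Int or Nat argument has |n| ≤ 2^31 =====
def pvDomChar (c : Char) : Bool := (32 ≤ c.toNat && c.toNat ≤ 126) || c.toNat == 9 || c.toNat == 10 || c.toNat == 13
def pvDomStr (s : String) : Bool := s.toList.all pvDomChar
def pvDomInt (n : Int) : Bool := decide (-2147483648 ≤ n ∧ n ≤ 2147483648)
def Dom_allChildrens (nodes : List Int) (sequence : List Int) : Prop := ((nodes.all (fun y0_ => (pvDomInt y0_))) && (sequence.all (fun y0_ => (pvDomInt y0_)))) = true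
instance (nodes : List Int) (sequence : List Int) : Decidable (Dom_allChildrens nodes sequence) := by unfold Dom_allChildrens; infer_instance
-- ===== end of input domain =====

-- B replaces A's init-then-dispatch dict building by a dict comprehension with one filtering scan per key; objective: simpler.

-- ===== PORT A =====
def allChildrens (nodes : List Int) (sequence : List Int) : List (Int × List Int) :=
  -- result = dict(); for node in nodes: result[node] = []
  let result : PySem.Dict Int (List Int) :=
    nodes.foldl (fun d node => d.insert node ([] : List Int)) PySem.Dict.empty
  -- for index in range(len(sequence)): if sequence[index] in nodes: result[sequence[index]].append(index)
  let result :=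
    (PySem.List.pyRange 0 (PySem.List.len sequence) 1).foldl
      (fun d index =>
        if PySem.List.pyGetD sequence index 0 ∈ nodes then
          d.modify (PySem.List.pyGetD sequence index 0) [] (fun l => l ++ [index])
        else d)
      result
  result.items

-- ===== PORT B =====
-- [i for i in range(len(sequence)) if sequence[i] == node]
def allChildrensBucket (sequence : List Int) (node : Int) : List Int :=
  (PySem.List.pyRange 0 (PySem.List.len sequence) 1).filter
    (fun i => PySem.List.pyGetD sequence i 0 == node)

-- {node: [...] for node in nodes}
def allChildrens_alt (nodes : List Int) (sequence : List Int) : List (Int × List Int) :=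
  (nodes.foldl (fun d node => d.insert node (allChildrensBucket sequence node))
    (PySem.Dict.empty : PySem.Dict Int (List Int))).items

-- ===== PRECONDITION & SPEC =====
def Spec_allChildrens (nodes : List Int) (sequence : List Int) (out : List (Int × List Int)) : Prop := out = allChildrens_alt nodes sequence
instance (nodes : List Int) (sequence : List Int) (out : List (Int × List Int)) : Decidable (Spec_allChildrens nodes sequence out) := by unfold Spec_allChildrens; infer_instance

-- ===== CLAIM (what is proved, stated in full; the proofs are below) =====
def Claim_equal_allChildrens : Prop := ∀ (nodes : List Int) (sequence : List Int), Dom_allChildrens nodes sequence → Spec_allChildrens nodes sequence (allChildrens nodes sequence)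

-- ===== LEMMAS AND PROOFS =====

-- getD through a loop inserting a value computed from each key
theorem getD_foldl_insert_fun (l : List Int) (g : Int → List Int)
    (d : PySem.Dict Int (List Int)) (k : Int) (dflt : List Int) :
    (l.foldl (fun d n => d.insert n (g n)) d).getD k dflt
      = if k ∈ l then g k else d.getD k dflt := by
  induction l generalizing d with
  | nil => simp
  | cons n ns ih =>
    simp only [List.foldl_cons, ih, PySem.Dict.getD_insert, List.mem_cons]
    by_cases hk : k ∈ ns <;> by_cases hn : k = n <;> simp [hk, hn]

-- A's second loop leaves the key set unchanged when every node is already a key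
theorem keys_step_loop (nodes : List Int) (s : List Int) (L : List Int)
    (d : PySem.Dict Int (List Int)) (h : ∀ x ∈ nodes, d.contains x = true) :
    (L.foldl
      (fun d index =>
        if PySem.List.pyGetD s index 0 ∈ nodes then
          d.modify (PySem.List.pyGetD s index 0) [] (fun l => l ++ [index])
        else d) d).keys = d.keys := by
  induction L generalizing d with
  | nil => rfl
  | cons i L ih =>
    simp only [List.foldl_cons]
    by_cases hg : PySem.List.pyGetD s i 0 ∈ nodes
    · rw [if_pos hg, ih]
      · exact PySem.Dict.keys_insert_of_contains d _ (h _ hg)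
      · intro x hx
        simp [PySem.Dict.contains_modify, h x hx]
    · rw [if_neg hg, ih _ h]

-- getD through A's second loop: appends exactly the matching indices, in order
theorem getD_step_loop (nodes : List Int) (s : List Int) (c : Int) (hc : c ∈ nodes)
    (L : List Int) (d : PySem.Dict Int (List Int)) :
    (L.foldl
      (fun d index =>
        if PySem.List.pyGetD s index 0 ∈ nodes then
          d.modify (PySem.List.pyGetD s index 0) [] (fun l => l ++ [index])
        else d) d).getD c []
      = d.getD c [] ++ L.filter (fun i => PySem.List.pyGetD s i 0 == c) := by
  induction L generalizing d with
  | nil => simp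
  | cons i L ih =>
    simp only [List.foldl_cons, List.filter_cons]
    by_cases hv : PySem.List.pyGetD s i 0 = c
    · subst hv
      rw [if_pos hc, ih, PySem.Dict.getD_modify_self]
      simp [List.append_assoc]
    · have hbeq : (PySem.List.pyGetD s i 0 == c) = false := by simp [hv]
      rw [hbeq]
      by_cases hg : PySem.List.pyGetD s i 0 ∈ nodes
      · rw [if_pos hg, ih, PySem.Dict.getD_modify_of_ne _ _ _ (Ne.symm hv)]
        simp
      · rw [if_neg hg, ih]
        simp

theorem keys_A_init (nodes : List Int) :
    (nodes.foldl (fun d node => d.insert node ([] : List Int)) PySem.Dict.empty).keys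
      = PySem.Set.ofList nodes := by
  rw [PySem.Dict.keys_foldl_insert]
  simp [PySem.Set.update_nil_left]

theorem keys_B (nodes s : List Int) :
    (nodes.foldl (fun d node => d.insert node (allChildrensBucket s node))
      (PySem.Dict.empty : PySem.Dict Int (List Int))).keys = PySem.Set.ofList nodes := by
  rw [PySem.Dict.keys_foldl_insert]
  simp [PySem.Set.update_nil_left]

-- ===== VERDICT (by name: the statement is the Claim_ definition above) =====
theorem allChildrens_spec : Claim_equal_allChildrens := by
  intro nodes sequence _
  unfold Spec_allChildrens allChildrens allChildrens_alt
  set d0 : PySem.Dict Int (List Int) :=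
    nodes.foldl (fun d node => d.insert node ([] : List Int)) PySem.Dict.empty with hd0
  set dA := (PySem.List.pyRange 0 (PySem.List.len sequence) 1).foldl
      (fun d index =>
        if PySem.List.pyGetD sequence index 0 ∈ nodes then
          d.modify (PySem.List.pyGetD sequence index 0) [] (fun l => l ++ [index])
        else d) d0 with hdA
  set dB := nodes.foldl (fun d node => d.insert node (allChildrensBucket sequence node))
      (PySem.Dict.empty : PySem.Dict Int (List Int)) with hdB
  have hkeys0 : d0.keys = PySem.Set.ofList nodes := keys_A_init nodes
  have hcont0 : ∀ x ∈ nodes, d0.contains x = true := by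
    intro x hx
    rw [PySem.Dict.contains_iff_mem_keys, hkeys0]
    exact (PySem.Set.mem_ofList nodes x).mpr hx
  have hkA : dA.keys = PySem.Set.ofList nodes := by
    rw [hdA, keys_step_loop nodes sequence _ d0 hcont0, hkeys0]
  have hkB : dB.keys = PySem.Set.ofList nodes := keys_B nodes sequence
  have hndA : dA.keys.Nodup := by rw [hkA]; exact PySem.Set.nodup_ofList nodes
  have hndB : dB.keys.Nodup := by rw [hkB]; exact PySem.Set.nodup_ofList nodes
  rw [PySem.Dict.items_eq_map_keys dA hndA [], PySem.Dict.items_eq_map_keys dB hndB [],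
    hkA, hkB]
  apply List.map_congr_left
  intro k hk
  have hkmem : k ∈ nodes := (PySem.Set.mem_ofList nodes k).mp hk
  have hA : dA.getD k [] = allChildrensBucket sequence k := by
    rw [hdA, getD_step_loop nodes sequence k hkmem, hd0,
      getD_foldl_insert_fun nodes (fun _ => ([] : List Int)), if_pos hkmem]
    rfl
  have hB : dB.getD k [] = allChildrensBucket sequence k := by
    rw [hdB, getD_foldl_insert_fun nodes (fun n => allChildrensBucket sequence n),
      if_pos hkmem]
  rw [hA, hB]
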